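-- pv_equiv track=rewrite | github.com/hitochan777/kata | atcoder/abc/abc194/E.py | solve
-- ===== SOURCE A (Python) =====
-- def solve(N, M, A):
--     pre = list([] for _ in range(N))
--     for i, a in enumerate(A):
--         pre[a].append(i)
--
--     for i in range(N):
--         pre[i].append(N)
--         prev = -1
--         for pos in pre[i]:
--             if pos - prev > M:
--                 return i
--
--             prev = pos
--
--     return N
-- ===== SOURCE B (Python) =====
-- def solve(N, M, A):
--     last = [-1] * N
--     maxgap = [0] * N
--     for j, a in enumerate(A):
--         g = j - last[a]
--         if g > maxgap[a]:
--             maxgap[a] = g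
--         last[a] = j
--     for i in range(N):
--         g = N - last[i]
--         if g > maxgap[i]:
--             maxgap[i] = g
--     for i in range(N):
--         if maxgap[i] > M:
--             return i
--     return N
-- ===== Notes on version B (the rewrite author's own statement) =====
-- stated objective: alternative
-- what changed: Replaces A's N bucketed per-value position lists (each extended with a sentinel and re-scanned for a gap > M) by two flat running arrays last[] and maxgap[] maintained in a single forward pass plus an O(N) finalisation, then the same left-to-right scan.
import Mathlib
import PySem

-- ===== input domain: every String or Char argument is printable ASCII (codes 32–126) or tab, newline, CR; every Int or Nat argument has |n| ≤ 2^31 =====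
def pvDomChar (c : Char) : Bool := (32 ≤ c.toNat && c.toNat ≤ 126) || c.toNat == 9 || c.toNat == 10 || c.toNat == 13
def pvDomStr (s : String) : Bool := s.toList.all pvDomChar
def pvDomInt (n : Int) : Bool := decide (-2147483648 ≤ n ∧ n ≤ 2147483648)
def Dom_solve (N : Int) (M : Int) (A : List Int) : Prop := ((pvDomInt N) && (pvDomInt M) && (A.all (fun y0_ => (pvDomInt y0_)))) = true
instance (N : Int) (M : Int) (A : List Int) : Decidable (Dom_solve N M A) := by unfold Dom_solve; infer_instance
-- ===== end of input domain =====

-- B replaces A's N bucketed position lists (each re-scanned with a sentinel) by two flat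
-- running arrays (last occurrence, max gap) filled in one forward pass; same asymptotic
-- cost, objective: alternative decomposition/data structure.

-- ===== PORT A =====
-- body of A's first loop: 'pre[a].append(i)' as a functional update
def stepA (pre : List (List Int)) (ia : Int × Int) : List (List Int) :=
  PySem.List.pySetD pre ia.2 (PySem.List.pyGetD pre ia.2 [] ++ [ia.1])

-- inner loop 'for pos in pre[i]: if pos - prev > M: return i; prev = pos'
def solveRowA (M : Int) : List Int → Int → Bool
  | [], _ => false
  | pos :: rest, prev => if pos - prev > M then true else solveRowA M rest pos

-- outer loop 'for i in range(N): … return i …' ; 'pre[i].append(N)' becomes '++ [N]'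
def solveScanA (pre : List (List Int)) (N M : Int) : List Int → Int
  | [] => N
  | i :: rest =>
      if solveRowA M (PySem.List.pyGetD pre i [] ++ [N]) (-1) then i
      else solveScanA pre N M rest

def solve (N : Int) (M : Int) (A : List Int) : Int :=
  let pre := (PySem.List.enumerate A 0).foldl stepA (List.replicate N.toNat ([] : List Int))
  solveScanA pre N M (PySem.List.pyRange 0 N 1)

-- ===== PORT B =====
-- one step of B's forward pass: st = (last, maxgap), ja = (j, a)
def stepB (st : List Int × List Int) (ja : Int × Int) : List Int × List Int :=
  let g := ja.1 - PySem.List.pyGetD st.1 ja.2 0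
  let mg := if g > PySem.List.pyGetD st.2 ja.2 0 then PySem.List.pySetD st.2 ja.2 g else st.2
  (PySem.List.pySetD st.1 ja.2 ja.1, mg)

-- finalisation step: maxgap[i] = max(maxgap[i], N - last[i])
def finB (N : Int) (last : List Int) (mg : List Int) (i : Int) : List Int :=
  let g := N - PySem.List.pyGetD last i 0
  if g > PySem.List.pyGetD mg i 0 then PySem.List.pySetD mg i g else mg

-- final scan 'for i in range(N): if maxgap[i] > M: return i'
def scanB (mg : List Int) (N M : Int) : List Int → Int
  | [] => N
  | i :: rest => if PySem.List.pyGetD mg i 0 > M then i else scanB mg N M rest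

def solve_alt (N : Int) (M : Int) (A : List Int) : Int :=
  let st := (PySem.List.enumerate A 0).foldl stepB
    (List.replicate N.toNat (-1 : Int), List.replicate N.toNat (0 : Int))
  let mg2 := (PySem.List.pyRange 0 N 1).foldl (finB N st.1) st.2
  scanB mg2 N M (PySem.List.pyRange 0 N 1)

-- ===== PRECONDITION & SPEC =====
-- Pre_ excludes exactly the inputs on which A raises IndexError: some element outside [-N, N).
def Pre_solve (N : Int) (M : Int) (A : List Int) : Prop := ∀ a ∈ A, -N ≤ a ∧ a < N
instance (N : Int) (M : Int) (A : List Int) : Decidable (Pre_solve N M A) := by unfold Pre_solve; infer_instance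
def pvWitness_solve : Int × Int × List Int := (3, 1, [0, 2, 1, 0])

def Spec_solve (N : Int) (M : Int) (A : List Int) (out : Int) : Prop := out = solve_alt N M A
instance (N : Int) (M : Int) (A : List Int) (out : Int) : Decidable (Spec_solve N M A out) := by unfold Spec_solve; infer_instance

-- ===== CLAIM (what is proved, stated in full; the proofs are below) =====
def Claim_equal_solve : Prop := ∀ (N : Int) (M : Int) (A : List Int), Dom_solve N M A → Pre_solve N M A → Spec_solve N M A (solve N M A)

-- ===== LEMMAS AND PROOFS =====

-- Python's effective index for i with -n ≤ i < n
def nidx (n : Nat) (i : Int) : Nat := if 0 ≤ i then i.toNat else n - (-i).toNat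

lemma nidx_lt {n : Nat} {i : Int} (h1 : -(n:Int) ≤ i) (h2 : i < n) : nidx n i < n := by
  unfold nidx; split_ifs <;> omega

lemma pyIdx_eq {n : Nat} {i : Int} (h1 : -(n:Int) ≤ i) (h2 : i < n) :
    PySem.List.pyIdx? n i = some (nidx n i) := by
  simp only [PySem.List.pyIdx?, nidx]; split_ifs <;> simp_all

lemma pyIdx_lt {n : Nat} {i : Int} {k : Nat} (h : PySem.List.pyIdx? n i = some k) : k < n := by
  simp only [PySem.List.pyIdx?] at h; split_ifs at h <;> simp_all <;> omega

lemma pyGetD_nidx {α : Type} {xs : List α} {i : Int} (d : α)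
    (h1 : -(xs.length:Int) ≤ i) (h2 : i < xs.length) :
    PySem.List.pyGetD xs i d = xs[nidx xs.length i]'(nidx_lt h1 h2) := by
  simp [PySem.List.pyGetD, PySem.List.pyGet?, pyIdx_eq h1 h2,
    List.getElem?_eq_getElem (nidx_lt h1 h2)]

lemma pySetD_nidx {α : Type} {xs : List α} {i : Int} (v : α)
    (h1 : -(xs.length:Int) ≤ i) (h2 : i < xs.length) :
    PySem.List.pySetD xs i v = xs.set (nidx xs.length i) v := by
  simp [PySem.List.pySetD, PySem.List.pySet?, pyIdx_eq h1 h2]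

lemma nidx_of_nonneg {n : Nat} {i : Int} (h : 0 ≤ i) : nidx n i = i.toNat := by
  simp [nidx, h]

-- per-value state of B as a function of A's bucketed position list
def step2 (st : Int × Int) (q : Int) : Int × Int :=
  (if q - st.2 > st.1 then q - st.2 else st.1, q)

def profL (ps : List Int) : Int := (ps.foldl step2 (0, -1)).2
def profM (ps : List Int) : Int := (ps.foldl step2 (0, -1)).1

lemma length_stepA (pre : List (List Int)) (ia : Int × Int) :
    (stepA pre ia).length = pre.length := by
  simp only [stepA, PySem.List.pySetD, PySem.List.pySet?]
  cases h : PySem.List.pyIdx? pre.length ia.2 <;> simp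

lemma length_foldA (E : List (Int × Int)) (pre : List (List Int)) :
    (E.foldl stepA pre).length = pre.length := by
  induction E generalizing pre with
  | nil => rfl
  | cons e E ih => simp [List.foldl_cons, ih, length_stepA]

lemma stepAB (pre : List (List Int)) (e : Int × Int)
    (h1 : -(pre.length:Int) ≤ e.2) (h2 : e.2 < pre.length) :
    stepB (pre.map profL, pre.map profM) e
      = ((stepA pre e).map profL, (stepA pre e).map profM) := by
  have hL : (pre.map profL).length = pre.length := by simp
  have hM : (pre.map profM).length = pre.length := by simp
  have h1L : -(((pre.map profL).length : Nat) : Int) ≤ e.2 := by rw [hL]; exact h1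
  have h2L : e.2 < (((pre.map profL).length : Nat) : Int) := by rw [hL]; exact h2
  have h1M : -(((pre.map profM).length : Nat) : Int) ≤ e.2 := by rw [hM]; exact h1
  have h2M : e.2 < (((pre.map profM).length : Nat) : Int) := by rw [hM]; exact h2
  have hidx : nidx pre.length e.2 < pre.length := nidx_lt h1 h2
  have hA : stepA pre e = pre.set (nidx pre.length e.2)
      (pre[nidx pre.length e.2] ++ [e.1]) := by
    rw [stepA, pyGetD_nidx [] h1 h2, pySetD_nidx _ h1 h2]
  have hprof : ∀ f : List Int → Int,
      (stepA pre e).map f = (pre.map f).set (nidx pre.length e.2)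
        (f (pre[nidx pre.length e.2] ++ [e.1])) := by
    intro f; rw [hA, List.map_set]
  rw [stepB, pyGetD_nidx 0 h1L h2L, pyGetD_nidx 0 h1M h2M,
    pySetD_nidx _ h1L h2L, hprof profL, hprof profM]
  simp only [hL, hM, List.getElem_map]
  rw [Prod.mk.injEq]
  refine ⟨?_, ?_⟩
  · -- last component
    have : profL (pre[nidx pre.length e.2] ++ [e.1]) = e.1 := by
      simp [profL, List.foldl_append, step2]
    rw [this]
  · -- maxgap component
    have hsplit : profM (pre[nidx pre.length e.2] ++ [e.1]) =
        if e.1 - profL pre[nidx pre.length e.2] > profM pre[nidx pre.length e.2]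
        then e.1 - profL pre[nidx pre.length e.2]
        else profM pre[nidx pre.length e.2] := by
      simp [profM, profL, List.foldl_append, step2]
    rw [hsplit]
    by_cases hc : e.1 - profL pre[nidx pre.length e.2] > profM pre[nidx pre.length e.2]
    · rw [if_pos hc, if_pos hc, pySetD_nidx _ h1M h2M, hM]
    · rw [if_neg hc, if_neg hc]
      rw [show profM pre[nidx pre.length e.2] = (pre.map profM)[nidx pre.length e.2]'(by simpa using hidx) by simp]
      rw [List.set_getElem_self]

lemma foldAB (E : List (Int × Int)) (pre : List (List Int))
    (hE : ∀ p ∈ E, -(pre.length:Int) ≤ p.2 ∧ p.2 < pre.length) :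
    E.foldl stepB (pre.map profL, pre.map profM)
      = ((E.foldl stepA pre).map profL, (E.foldl stepA pre).map profM) := by
  induction E generalizing pre with
  | nil => rfl
  | cons e E ih =>
      obtain ⟨h1, h2⟩ := hE e (by simp)
      rw [List.foldl_cons, List.foldl_cons, stepAB pre e h1 h2, ih]
      intro p hp
      have := hE p (by simp [hp])
      simpa [length_stepA] using this

-- positions stored by A's first loop stay nonnegative
lemma mem_foldA (E : List (Int × Int)) (pre : List (List Int))
    (hpre : ∀ ps ∈ pre, ∀ p ∈ ps, 0 ≤ p) (hE : ∀ p ∈ E, 0 ≤ p.1) :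
    ∀ ps ∈ E.foldl stepA pre, ∀ p ∈ ps, 0 ≤ p := by
  induction E generalizing pre with
  | nil => exact hpre
  | cons e E ih =>
      rw [List.foldl_cons]
      refine ih (stepA pre e) ?_ (fun p hp => hE p (by simp [hp]))
      intro ps hps p hp
      rw [stepA, PySem.List.pySetD, PySem.List.pySet?] at hps
      cases hidx : PySem.List.pyIdx? pre.length e.2 with
      | none => rw [hidx] at hps; simp at hps; exact hpre ps hps p hp
      | some k =>
          rw [hidx] at hps
          simp only [Option.map_some, Option.getD_some] at hps
          rcases List.mem_or_eq_of_mem_set hps with h | h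
          · exact hpre ps h p hp
          · subst h
            rcases List.mem_append.1 hp with h | h
            · have hk : k < pre.length := pyIdx_lt hidx
              rw [PySem.List.pyGetD, PySem.List.pyGet?, hidx] at h
              simp [List.getElem?_eq_getElem hk] at h
              exact hpre _ (List.getElem_mem hk) p h
            · simp at h; subst h; exact hE e (by simp)

lemma mem_enumerate {A : List Int} {s : Int} (hs : 0 ≤ s) :
    ∀ p ∈ PySem.List.enumerate A s, 0 ≤ p.1 ∧ p.2 ∈ A := by
  induction A generalizing s with
  | nil => simp [PySem.List.enumerate]
  | cons a A ih =>
      intro p hp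
      simp only [PySem.List.enumerate, List.mem_cons] at hp
      rcases hp with h | h
      · subst h; exact ⟨hs, by simp⟩
      · have := ih (s := s + 1) (by omega) p h
        exact ⟨this.1, by simp [this.2]⟩

-- A's row check, with an absorbed accumulator for the gaps already seen
lemma rowL (M N : Int) (ps : List Int) : ∀ (prev mg : Int),
    (solveRowA M (ps ++ [N]) prev || decide (mg > M))
      = decide ((ps.foldl step2 (mg, prev)).1 > M ∨ N - (ps.foldl step2 (mg, prev)).2 > M) := by
  induction ps with
  | nil =>
      intro prev mg
      simp only [List.nil_append, solveRowA, List.foldl_nil]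
      by_cases h : N - prev > M <;>
        simp [h, true_eq_decide_iff, decide_eq_decide] <;> omega
  | cons q rest ih =>
      intro prev mg
      simp only [List.cons_append, solveRowA, List.foldl_cons, step2]
      rw [← ih q (if q - prev > mg then q - prev else mg)]
      cases hrow : solveRowA M (rest ++ [N]) q <;>
        by_cases h1 : q - prev > M <;> by_cases h2 : q - prev > mg <;>
          simp [h1, h2, true_eq_decide_iff, decide_eq_decide] <;> omega

lemma rowTrue (M N : Int) (ps : List Int) (prev : Int) (hM : M < 0)
    (hps : ∀ p ∈ ps, prev ≤ p) (hN : prev ≤ N) :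
    solveRowA M (ps ++ [N]) prev = true := by
  cases ps with
  | nil => simp only [List.nil_append, solveRowA]; rw [if_pos (by omega)]
  | cons q rest =>
      have : prev ≤ q := hps q (by simp)
      simp only [List.cons_append, solveRowA]; rw [if_pos (by omega)]

lemma profM_mono (ps : List Int) : ∀ (mg prev : Int), mg ≤ (ps.foldl step2 (mg, prev)).1 := by
  induction ps with
  | nil => intro mg prev; simp
  | cons q rest ih =>
      intro mg prev
      simp only [List.foldl_cons, step2]
      by_cases h : q - prev > mg
      · rw [if_pos h]; have := ih (q - prev) q; omega
      · rw [if_neg h]; exact ih mg q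

lemma length_finB (N : Int) (last mg : List Int) (i : Int) :
    (finB N last mg i).length = mg.length := by
  rw [finB, PySem.List.pySetD, PySem.List.pySet?]
  cases h : PySem.List.pyIdx? mg.length i <;> split_ifs <;> simp

lemma length_finFold (N : Int) (last : List Int) (l : List Int) (mg : List Int) :
    (l.foldl (finB N last) mg).length = mg.length := by
  induction l generalizing mg with
  | nil => rfl
  | cons i l ih => rw [List.foldl_cons, ih, length_finB]

lemma pyGetD_getD {α : Type} {xs : List α} {i : Int} (d : α)
    (h1 : -(xs.length:Int) ≤ i) (h2 : i < xs.length) :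
    PySem.List.pyGetD xs i d = xs.getD (nidx xs.length i) d := by
  rw [pyGetD_nidx d h1 h2, List.getD_eq_getElem xs d (nidx_lt h1 h2)]

lemma finFold_get (N : Int) (last : List Int) (l : List Int) : ∀ (mg : List Int),
    l.Nodup → (∀ i ∈ l, 0 ≤ i ∧ i < (mg.length:Int)) → ∀ k, k < mg.length →
    (l.foldl (finB N last) mg).getD k 0
      = if (k:Int) ∈ l then
          (if N - PySem.List.pyGetD last (k:Int) 0 > mg.getD k 0
           then N - PySem.List.pyGetD last (k:Int) 0 else mg.getD k 0)
        else mg.getD k 0 := by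
  induction l with
  | nil => intro mg _ _ k hk; simp
  | cons i l ih =>
      intro mg hnd hl k hk
      obtain ⟨hi0, hilt⟩ := hl i (by simp)
      have hmg' : finB N last mg i =
          if N - PySem.List.pyGetD last i 0 > mg.getD i.toNat 0
          then mg.set i.toNat (N - PySem.List.pyGetD last i 0) else mg := by
        rw [finB, pyGetD_getD (xs := mg) (i := i) 0 (by omega) (by omega),
          pySetD_nidx _ (by omega) (by omega), nidx_of_nonneg hi0]
      have hlen' : (finB N last mg i).length = mg.length := length_finB N last mg i
      rw [List.foldl_cons, ih (finB N last mg i) hnd.of_cons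
        (fun j hj => by rw [hlen']; exact hl j (by simp [hj])) k (by rw [hlen']; exact hk)]
      by_cases hik : (k:Int) = i
      · subst hik
        have hknl : ((k:Nat):Int) ∉ l := (List.nodup_cons.1 hnd).1
        rw [if_neg hknl, if_pos (by simp), hmg']
        simp only [Int.toNat_natCast]
        split_ifs with h1
        · simp [List.getD_eq_getElem?_getD, hk]
        · rfl
      · simp only [List.mem_cons, hik, false_or]
        have hne : i.toNat ≠ k := by omega
        have hget : (finB N last mg i).getD k 0 = mg.getD k 0 := by
          rw [hmg']
          split_ifs with h1
          · simp [List.getD_eq_getElem?_getD, List.getElem?_set_ne hne]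
          · rfl
        rw [hget]

lemma scan_congr (pre : List (List Int)) (mg2 : List Int) (N M : Int) (l : List Int)
    (h : ∀ i ∈ l, solveRowA M (PySem.List.pyGetD pre i [] ++ [N]) (-1)
          = decide (PySem.List.pyGetD mg2 i 0 > M)) :
    solveScanA pre N M l = scanB mg2 N M l := by
  induction l with
  | nil => rfl
  | cons i l ih =>
      simp only [solveScanA, scanB, h i (by simp)]
      rw [ih (fun j hj => h j (by simp [hj]))]
      by_cases hc : PySem.List.pyGetD mg2 i 0 > M <;> simp [hc]

-- ===== VERDICT (by name: the statement is the Claim_ definition above) =====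
theorem solve_spec : Claim_equal_solve := by
  intro N M A _ hpre
  unfold Spec_solve solve solve_alt
  set n := N.toNat with hn
  set E := PySem.List.enumerate A 0 with hEdef
  have hE : ∀ p ∈ E, 0 ≤ p.1 ∧ p.2 ∈ A := mem_enumerate (le_refl 0)
  have hbounds : ∀ p ∈ E, -((List.replicate n ([]:List Int)).length : Int) ≤ p.2 ∧
      p.2 < ((List.replicate n ([]:List Int)).length : Int) := by
    intro p hp
    obtain ⟨-, hmem⟩ := hE p hp
    obtain ⟨hlo, hhi⟩ := hpre p.2 hmem
    simp only [List.length_replicate]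
    omega
  have hinit : ((List.replicate n (-1 : Int)), (List.replicate n (0 : Int)))
      = ((List.replicate n ([]:List Int)).map profL, (List.replicate n ([]:List Int)).map profM) := by
    simp [List.map_replicate, profL, profM, step2]
  set preF := E.foldl stepA (List.replicate n ([]:List Int)) with hpreF
  have hlenF : preF.length = n := by rw [hpreF, length_foldA]; simp
  have hfold := foldAB E (List.replicate n ([]:List Int)) hbounds
  rw [hinit, hfold]
  have hpos : ∀ ps ∈ preF, ∀ p ∈ ps, 0 ≤ p :=
    mem_foldA E _ (by intro ps hps; simp at hps; simp [hps]) (fun p hp => (hE p hp).1)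
  -- pointwise agreement of the two scans
  apply scan_congr
  intro i hi
  obtain ⟨hi0, hiN⟩ := PySem.List.mem_pyRange_one.1 hi
  have hkn : i.toNat < n := by omega
  have hNpos : 0 < N := by omega
  have hmgl : (preF.map profM).length = n := by simp [hlenF]
  have hll : (preF.map profL).length = n := by simp [hlenF]
  have hl : ∀ j ∈ PySem.List.pyRange 0 N 1, 0 ≤ j ∧ j < ((preF.map profM).length : Int) := by
    intro j hj
    obtain ⟨h1, h2⟩ := PySem.List.mem_pyRange_one.1 hj
    rw [hmgl]; omega
  have hkmem : ((i.toNat : Nat) : Int) ∈ PySem.List.pyRange 0 N 1 := by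
    rw [PySem.List.mem_pyRange_one]; omega
  have hget := finFold_get N (preF.map profL) (PySem.List.pyRange 0 N 1) (preF.map profM)
    (PySem.List.nodup_pyRange_one 0 N) hl i.toNat (by rw [hmgl]; exact hkn)
  rw [if_pos hkmem] at hget
  -- rewrite the mg2 lookup to a getElem
  have hlen2 : ((PySem.List.pyRange 0 N 1).foldl (finB N (preF.map profL)) (preF.map profM)).length = n := by
    rw [length_finFold, hmgl]
  have hmg2 : PySem.List.pyGetD
      ((PySem.List.pyRange 0 N 1).foldl (finB N (preF.map profL)) (preF.map profM)) i 0
      = ((PySem.List.pyRange 0 N 1).foldl (finB N (preF.map profL)) (preF.map profM)).getD i.toNat 0 := by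
    rw [pyGetD_getD 0 (by rw [hlen2]; omega) (by rw [hlen2]; omega)]
    congr 1
    rw [hlen2]
    exact nidx_of_nonneg hi0
  have hcast : (((i.toNat : Nat) : Int)) = i := by omega
  rw [hcast] at hget
  rw [hmg2, hget]
  -- rewrite the last lookup and the pre lookup
  have hlast : PySem.List.pyGetD (preF.map profL) i 0 = profL (preF[i.toNat]'(by omega)) := by
    rw [pyGetD_nidx 0 (by rw [hll]; omega) (by rw [hll]; omega)]
    simp [nidx_of_nonneg hi0, hlenF]
  have hmgk : (preF.map profM).getD i.toNat 0 = profM (preF[i.toNat]'(by omega)) := by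
    rw [List.getD_eq_getElem _ 0 (by rw [hmgl]; exact hkn)]
    simp
  have hpreget : PySem.List.pyGetD preF i [] = preF[i.toNat]'(by omega) := by
    rw [pyGetD_nidx [] (by rw [hlenF]; omega) (by rw [hlenF]; omega)]
    congr 1
    exact nidx_of_nonneg hi0
  rw [hlast, hmgk, hpreget]
  set ps := preF[i.toNat]'(by omega) with hps
  -- core: A's row check equals B's accumulated max test
  have hrow := rowL M N ps (-1) 0
  have hLM : profL ps = (ps.foldl step2 (0, -1)).2 := rfl
  have hMM : profM ps = (ps.foldl step2 (0, -1)).1 := rfl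
  by_cases hM : 0 > M
  · have hA : solveRowA M (ps ++ [N]) (-1) = true :=
      rowTrue M N ps (-1) (by omega) (fun p hp => by have := hpos ps (by exact List.getElem_mem _) p hp; omega) (by omega)
    have hBm : 0 ≤ profM ps := profM_mono ps 0 (-1)
    rw [hA]
    have : (if N - profL ps > profM ps then N - profL ps else profM ps) > M := by
      split_ifs <;> omega
    simp [this]
  · rw [show (decide (0 > M)) = false by simp; omega] at hrow
    rw [Bool.or_false] at hrow
    rw [hrow, ← hMM, ← hLM, decide_eq_decide]
    constructor
    · intro h; split_ifs with hc <;> omega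
    · intro h; split_ifs at h <;> omega
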